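-- pv_equiv track=rewrite | github.com/kn33hit/Coursework | GL_backup/201/PJT/PJT2/project2.py | validateEq
-- ===== SOURCE A (Python) =====
-- def validateEq(inputList):
--     counter = 0
--     # the operatorList and numberList are the characters allowed
--     # anything except these two will be denied and asked for again
--     operatorList = ["+","-","*","^","/","(",")"]
--     numberList = ["0","1","2","3","4","5","6","7","8","9"]
--     inputValid = False
--     for i in range(len(inputList)):
--         if inputList[i] in operatorList or inputList[i] in \
-- numberList:
--             counter += 1
--     # returns true if input is valid, and false if not
--     if counter == len(inputList):
--         inputValid = True
--     return inputValid
-- ===== SOURCE B (Python) =====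
-- def validateEq(inputList):
--     # Inverted traversal: iterate over the 17 allowed characters and count
--     # each one's occurrences in the input; every element matches at most one
--     # allowed character, so the counts sum to len(inputList) exactly when
--     # every element is an allowed character.
--     matched = 0
--     for c in "+-*^/()0123456789":
--         matched += inputList.count(c)
--     return matched == len(inputList)
-- ===== Notes on version B (the rewrite author's own statement) =====
-- stated objective: alternative
-- what changed: Inverts the traversal: instead of scanning the input index by index and testing each element against two allowed-character lists, B loops over the 17 allowed characters, sums inputList.count(c) for each, and compares the total with len(inputList); correctness rests on the allowed characters being distinct so each element is counted at most once.
import Mathlib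
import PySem

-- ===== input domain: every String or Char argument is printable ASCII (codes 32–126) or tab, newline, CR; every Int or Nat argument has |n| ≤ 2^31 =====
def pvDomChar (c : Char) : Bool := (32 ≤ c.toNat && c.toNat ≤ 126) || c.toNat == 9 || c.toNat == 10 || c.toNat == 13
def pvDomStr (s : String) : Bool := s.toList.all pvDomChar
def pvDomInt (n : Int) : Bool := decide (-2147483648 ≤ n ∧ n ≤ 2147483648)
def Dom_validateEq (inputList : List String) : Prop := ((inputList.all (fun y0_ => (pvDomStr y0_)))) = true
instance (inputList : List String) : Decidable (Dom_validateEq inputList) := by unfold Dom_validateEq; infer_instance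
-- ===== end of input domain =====

-- B inverts the traversal: it loops over the 17 allowed characters, sums each one's
-- occurrence count in the input and compares the total with the input length (alternative, same cost).

-- ===== PORT A =====
def validateEq (inputList : List String) : Bool :=
  let operatorList : List String := ["+","-","*","^","/","(",")"]
  let numberList : List String := ["0","1","2","3","4","5","6","7","8","9"]
  let inputValid := false
  let counter : Int :=
    (PySem.List.pyRange 0 (inputList.length : Int) 1).foldl
      (fun c i =>
        if operatorList.contains (PySem.List.pyGetD inputList i "")
           || numberList.contains (PySem.List.pyGetD inputList i "") then c + 1 else c) 0
  if counter = (inputList.length : Int) then true else inputValid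

-- ===== PORT B =====
-- iterating the Python string "+-*^/()0123456789" yields exactly these 1-char strings
def pvAllowedList : List String :=
  ["+","-","*","^","/","(",")","0","1","2","3","4","5","6","7","8","9"]

def validateEq_alt (inputList : List String) : Bool :=
  let matched : Int :=
    pvAllowedList.foldl (fun m c => m + (PySem.List.count inputList c : Int)) 0
  matched == (inputList.length : Int)

-- ===== PRECONDITION & SPEC =====
def Spec_validateEq (inputList : List String) (out : Bool) : Prop := out = validateEq_alt inputList
instance (inputList : List String) (out : Bool) : Decidable (Spec_validateEq inputList out) := by unfold Spec_validateEq; infer_instance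

-- ===== CLAIM =====
def Claim_equal_validateEq : Prop := ∀ (inputList : List String), Dom_validateEq inputList → Spec_validateEq inputList (validateEq inputList)

-- ===== LEMMAS AND PROOFS =====

def pvAllowedP (x : String) : Bool :=
  (["+","-","*","^","/","(",")"] : List String).contains x
    || (["0","1","2","3","4","5","6","7","8","9"] : List String).contains x

lemma mem_pvAllowedList_iff (x : String) : x ∈ pvAllowedList ↔ pvAllowedP x = true := by
  simp [pvAllowedList, pvAllowedP]
  tauto

-- since the allowed characters are distinct, each element contributes once
lemma count_pvAllowedList (x : String) :
    pvAllowedList.count x = if pvAllowedP x then 1 else 0 := by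
  by_cases h : pvAllowedP x = true
  · rw [if_pos h]
    exact List.count_eq_one_of_mem (by decide) ((mem_pvAllowedList_iff x).mpr h)
  · rw [if_neg h]
    exact List.count_eq_zero_of_not_mem (fun hm => h ((mem_pvAllowedList_iff x).mp hm))

lemma sum_counts (xs : List String) :
    pvAllowedList.foldl (fun m c => m + (xs.count c : Int)) 0 = (xs.countP pvAllowedP : Int) := by
  rw [PySem.List.foldl_add]
  induction xs with
  | nil => simp
  | cons x l ih =>
      have hmap : pvAllowedList.map (fun c => ((x :: l).count c : Int))
          = pvAllowedList.map (fun c => ((l.count c : Int) + if c == x then 1 else 0)) := by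
        apply List.map_congr_left
        intro c _
        rw [List.count_cons]
        push_cast
        by_cases hb : c = x
        · subst hb; simp
        · simp [hb, Ne.symm hb]
      rw [hmap, PySem.List.sum_map_add_int, PySem.List.sum_map_ite_one_zero]
      have hc : pvAllowedList.countP (fun c => c == x) = pvAllowedList.count x := rfl
      rw [hc, count_pvAllowedList, List.countP_cons]
      by_cases h : pvAllowedP x = true <;> simp [h] at ih ⊢ <;> omega

lemma counter_eq (xs : List String) :
    (PySem.List.pyRange 0 (xs.length : Int) 1).foldl
      (fun c i =>
        if (["+","-","*","^","/","(",")"] : List String).contains (PySem.List.pyGetD xs i "")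
           || (["0","1","2","3","4","5","6","7","8","9"] : List String).contains (PySem.List.pyGetD xs i "") then c + 1 else c) 0
      = (xs.countP pvAllowedP : Int) := by
  have hfun : (fun (c : Int) (i : Int) =>
        if (["+","-","*","^","/","(",")"] : List String).contains (PySem.List.pyGetD xs i "")
           || (["0","1","2","3","4","5","6","7","8","9"] : List String).contains (PySem.List.pyGetD xs i "") then c + 1 else c)
      = (fun (c : Int) (i : Int) => if pvAllowedP (PySem.List.pyGetD xs i "") then c + 1 else c) := rfl
  rw [hfun, PySem.List.foldl_pyRange_zero_pyGetD' xs ""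
      (fun c x => if pvAllowedP x then c + 1 else c) 0, PySem.List.foldl_if_add_one]
  ring

-- ===== VERDICT =====
theorem validateEq_spec : Claim_equal_validateEq := by
  intro xs _
  unfold Spec_validateEq
  simp only [validateEq, validateEq_alt, PySem.List.count_eq]
  rw [counter_eq, sum_counts]
  by_cases h : (xs.countP pvAllowedP : Int) = (xs.length : Int)
  · simp [h]
  · simp [h]
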